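-- pv_equiv track=rewrite | github.com/iotserver24/openyak | backend/app/session/microcompact.py | _count_recent_messages
-- ===== SOURCE A (Python) =====
-- from typing import Any
--
-- def _count_recent_messages(messages: list[dict[str, Any]], skip_turns: int) -> int:
--     """Count how many trailing messages constitute the last N assistant turns.
--
--     A 'turn' = one assistant message + its subsequent tool results + next user message.
--     We walk backwards counting assistant messages to find the cutoff index.
--     """
--     if skip_turns <= 0:
--         return 0
--
--     assistant_count = 0
--     for i in range(len(messages) - 1, -1, -1):
--         if messages[i].get("role") == "assistant":
--             assistant_count += 1
--             if assistant_count >= skip_turns: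
--                 return len(messages) - i
--     return 0  # Not enough turns to skip
-- ===== SOURCE B (Python) =====
-- def _count_recent_messages(messages, skip_turns):
--     if skip_turns <= 0:
--         return 0
--     idx = [i for i, m in enumerate(messages) if m.get("role") == "assistant"]
--     if len(idx) >= skip_turns:
--         return len(messages) - idx[-skip_turns]
--     return 0
-- ===== Notes on version B (the rewrite author's own statement) =====
-- stated objective: alternative
-- what changed: Replaces the backward counting loop with early exit by a single forward pass that collects all assistant indices, then returns len(messages) - idx[-skip_turns] by direct arithmetic lookup.
import Mathlib
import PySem

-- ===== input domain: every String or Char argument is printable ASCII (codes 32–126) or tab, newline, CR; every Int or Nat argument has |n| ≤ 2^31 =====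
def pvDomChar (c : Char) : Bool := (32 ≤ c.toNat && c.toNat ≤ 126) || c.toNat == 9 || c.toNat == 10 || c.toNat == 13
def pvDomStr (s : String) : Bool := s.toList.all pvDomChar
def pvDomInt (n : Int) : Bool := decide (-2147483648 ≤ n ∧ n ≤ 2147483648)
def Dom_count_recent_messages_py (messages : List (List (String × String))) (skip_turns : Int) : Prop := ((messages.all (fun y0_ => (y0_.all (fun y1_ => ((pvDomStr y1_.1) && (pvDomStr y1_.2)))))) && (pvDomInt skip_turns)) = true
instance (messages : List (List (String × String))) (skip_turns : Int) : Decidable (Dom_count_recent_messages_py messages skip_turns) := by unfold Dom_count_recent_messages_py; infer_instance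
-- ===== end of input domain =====

-- B replaces A's backward counting loop with early exit by one forward pass
-- collecting assistant indices plus an arithmetic lookup (objective: alternative).

-- messages[i].get("role") == "assistant"  (shared by both ports)
def pvIsAssistant (m : List (String × String)) : Bool :=
  (PySem.Dict.mk m).get? "role" == some "assistant"

-- ===== PORT A =====
-- the backward for-loop of A: iterates over range(len(messages)-1, -1, -1) with counter
def pvLoopA (messages : List (List (String × String))) (skip_turns : Int) :
    List Int → Int → Int
  | [], _ => 0
  | i :: rest, c =>
    if pvIsAssistant (PySem.List.pyGetD messages i []) then
      if c + 1 ≥ skip_turns then (messages.length : Int) - i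
      else pvLoopA messages skip_turns rest (c + 1)
    else pvLoopA messages skip_turns rest c

def count_recent_messages_py (messages : List (List (String × String))) (skip_turns : Int) : Int :=
  if skip_turns ≤ 0 then 0
  else pvLoopA messages skip_turns
    (PySem.List.pyRange ((messages.length : Int) - 1) (-1) (-1)) 0

-- ===== PORT B =====
def count_recent_messages_py_alt (messages : List (List (String × String))) (skip_turns : Int) : Int :=
  if skip_turns ≤ 0 then 0
  else
    let idx : List Int := (PySem.List.enumerate messages).filterMap
      (fun p => if pvIsAssistant p.2 then some p.1 else none)
    if (idx.length : Int) ≥ skip_turns then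
      (messages.length : Int) - PySem.List.pyGetD idx (-skip_turns) 0
    else 0

-- ===== PRECONDITION & SPEC =====
def Spec_count_recent_messages_py (messages : List (List (String × String))) (skip_turns : Int) (out : Int) : Prop := out = count_recent_messages_py_alt messages skip_turns
instance (messages : List (List (String × String))) (skip_turns : Int) (out : Int) : Decidable (Spec_count_recent_messages_py messages skip_turns out) := by unfold Spec_count_recent_messages_py; infer_instance

-- ===== CLAIM (what is proved, stated in full; the proofs are below) =====
def Claim_equal_count_recent_messages_py : Prop := ∀ (messages : List (List (String × String))) (skip_turns : Int), Dom_count_recent_messages_py messages skip_turns → Spec_count_recent_messages_py messages skip_turns (count_recent_messages_py messages skip_turns)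

-- ===== LEMMAS AND PROOFS =====

-- ascending list of assistant indices of l, starting at position s
def pvAsst : List (List (String × String)) → Int → List Int
  | [], _ => []
  | m :: t, s => if pvIsAssistant m then s :: pvAsst t (s + 1) else pvAsst t (s + 1)

lemma pvAsst_append (xs : List (List (String × String))) (x : List (String × String)) :
    ∀ s : Int, pvAsst (xs ++ [x]) s =
      pvAsst xs s ++ (if pvIsAssistant x then [s + (xs.length : Int)] else []) := by
  induction xs with
  | nil => intro s; simp [pvAsst]
  | cons m t ih =>
      intro s
      simp only [List.cons_append, pvAsst, ih (s + 1), List.length_cons]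
      split_ifs <;> simp <;> ring_nf

lemma pvEnum_filterMap (l : List (List (String × String))) :
    ∀ s : Int, (PySem.List.enumerate l s).filterMap
        (fun p => if pvIsAssistant p.2 then some p.1 else none) = pvAsst l s := by
  induction l with
  | nil => intro s; simp [PySem.List.enumerate_nil, pvAsst]
  | cons m t ih =>
      intro s
      simp only [PySem.List.enumerate_cons, List.filterMap_cons, pvAsst]
      split_ifs <;> simp [ih]

-- the main invariant of A's backward loop
lemma pvLoopA_eq (msgs : List (List (String × String))) (skip : Int) (_hs : 1 ≤ skip) :
    ∀ (k : Nat), k ≤ msgs.length → ∀ (c : Int), 0 ≤ c → c < skip →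
      pvLoopA msgs skip (PySem.List.pyRange ((k : Int) - 1) (-1) (-1)) c =
        (if skip - c ≤ ((pvAsst (msgs.take k) 0).length : Int) then
          (msgs.length : Int) -
            (pvAsst (msgs.take k) 0).getD
              ((pvAsst (msgs.take k) 0).length - (skip - c).toNat) 0
        else 0) := by
  intro k
  induction k with
  | zero =>
      intro _ c hc hcs
      rw [PySem.List.pyRange_neg_one_eq_nil (by omega)]
      simp [pvLoopA, pvAsst]
      omega
  | succ k ih =>
      intro hk c hc hcs
      have hk' : k < msgs.length := by omega
      have hrng : PySem.List.pyRange (((k + 1 : Nat) : Int) - 1) (-1) (-1)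
          = (k : Int) :: PySem.List.pyRange ((k : Int) - 1) (-1) (-1) := by
        have := PySem.List.pyRange_neg_one_cons (a := ((k + 1 : Nat) : Int) - 1) (b := (-1 : Int)) (by push_cast; omega)
        simpa using this
      have htake : msgs.take (k + 1) = msgs.take k ++ [msgs[k]] := by
        exact List.take_succ_eq_append_getElem hk'
      have hlen : (msgs.take k).length = k := by simp [List.length_take]; omega
      have happ := pvAsst_append (msgs.take k) msgs[k] 0
      rw [hlen] at happ
      have hget : PySem.List.pyGetD msgs ((k : Int)) ([] : List (String × String)) = msgs[k] := by
        rw [PySem.List.pyGetD_natCast]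
        exact List.getD_eq_getElem _ _ hk'
      set L := pvAsst (msgs.take k) 0 with hL
      rw [hrng]
      simp only [pvLoopA, hget, htake, happ]
      by_cases hp : pvIsAssistant msgs[k]
      · simp only [hp, if_true]
        by_cases hfin : c + 1 ≥ skip
        · -- returns n - k; skip - c = 1
          have hsc : skip - c = 1 := by omega
          simp only [hfin, if_true]
          have hlen2 : (L ++ [(0 : Int) + (k : Int)]).length = L.length + 1 := by simp
          rw [if_pos (by rw [hlen2]; omega)]
          have : (L ++ [(0 : Int) + (k : Int)]).length - (skip - c).toNat = L.length := by
            rw [hlen2, hsc]; omega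
          rw [this]
          rw [List.getD_eq_getElem _ _ (by simp)]
          simp
        · simp only [hfin, if_false]
          rw [ih (by omega) (c + 1) (by omega) (by omega)]
          have h2 : 2 ≤ skip - c := by omega
          have hlen2 : ((L ++ [(0 : Int) + (k : Int)]).length : Int) = (L.length : Int) + 1 := by
            simp
          by_cases hle : skip - (c + 1) ≤ (L.length : Int)
          · rw [if_pos hle, if_pos (by omega)]
            congr 1
            have hidx : (L ++ [(0 : Int) + (k : Int)]).length - (skip - c).toNat
                = L.length - (skip - (c + 1)).toNat := by
              simp only [List.length_append, List.length_cons, List.length_nil]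
              omega
            rw [hidx]
            have hlt : L.length - (skip - (c + 1)).toNat < L.length := by omega
            rw [List.getD_eq_getElem _ _ hlt,
                List.getD_eq_getElem _ _ (by
                  simp only [List.length_append, List.length_cons, List.length_nil]; omega)]
            rw [List.getElem_append_left (by omega)]
          · rw [if_neg hle, if_neg (by omega)]
      · simp only [hp, Bool.false_eq_true, if_false, List.append_nil]
        exact ih (by omega) c hc hcs

-- ===== VERDICT (by name: the statement is the Claim_ definition above) =====
theorem count_recent_messages_py_spec : Claim_equal_count_recent_messages_py := by
  intro msgs skip _dom
  unfold Spec_count_recent_messages_py count_recent_messages_py count_recent_messages_py_alt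
  by_cases hs : skip ≤ 0
  · simp [hs]
  · have hs1 : 1 ≤ skip := by omega
    rw [if_neg hs, if_neg hs]
    rw [pvEnum_filterMap msgs 0]
    have hmain := pvLoopA_eq msgs skip hs1 msgs.length le_rfl 0 le_rfl (by omega)
    rw [List.take_length] at hmain
    rw [hmain]
    simp only [sub_zero]
    set L := pvAsst msgs 0 with hL
    by_cases hge : ((L.length : Int)) ≥ skip
    · rw [if_pos (by omega), if_pos hge]
      have h1 : 0 < skip.toNat := by omega
      have h2 : skip.toNat ≤ L.length := by omega
      have hneg : -skip = -((skip.toNat : Nat) : Int) := by omega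
      rw [hneg, PySem.List.pyGetD_neg_natCast L skip.toNat 0 h1 h2]
      rw [List.getD_eq_getElem _ _ (by omega)]
    · rw [if_neg (by omega), if_neg hge]
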